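-- pv_equiv track=rewrite | github.com/TatianaShuvaeva/LearningPython | Unterricht_Aufgaben/Unterrichten/fibonacci_fakultaeten/modul/fakultaeten_fibonacci.py | erstellen_fakultaeten
-- ===== SOURCE A (Python) =====
-- from typing import List
--
-- def _fibonacci_fakultaeten(n) -> int:
--     if n < 2:
--         return n
--     return _fibonacci_fakultaeten(n - 1) + _fibonacci_fakultaeten(n - 2)
--
-- def erstellen_fakultaeten(anzahl_studenten_uni: int) -> tuple[List[int], int]:
--     if not isinstance(anzahl_studenten_uni, int) or anzahl_studenten_uni < 0:
--         raise ValueError("anzahl_studenten_uni muss integer und positiv sein")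
--
--     liste_fakultaeten: List[int] = []
--     studenten_fakultaeten: int = 0
--     n = 0
--
--     while True:
--         studenten = _fibonacci_fakultaeten(n)
--         if studenten_fakultaeten + studenten > anzahl_studenten_uni:
--             break
--         liste_fakultaeten.append(studenten)
--         studenten_fakultaeten += studenten
--         n += 1
--
--     return liste_fakultaeten, studenten_fakultaeten
-- ===== SOURCE B (Python) =====
-- def erstellen_fakultaeten(anzahl_studenten_uni):
--     if not isinstance(anzahl_studenten_uni, int) or anzahl_studenten_uni < 0:
--         raise ValueError("anzahl_studenten_uni muss integer und positiv sein")
--     liste_fakultaeten = []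
--     studenten_fakultaeten = 0
--     a, b = 0, 1
--     while studenten_fakultaeten + a <= anzahl_studenten_uni:
--         liste_fakultaeten.append(a)
--         studenten_fakultaeten += a
--         a, b = b, a + b
--     return liste_fakultaeten, studenten_fakultaeten
-- ===== Notes on version B (the rewrite author's own statement) =====
-- stated objective: faster
-- what changed: B replaces the exponential recursive Fibonacci recomputed from scratch each iteration with an iterative pair (a,b) that yields each Fibonacci term in O(1) while accumulating the running sum.
import Mathlib
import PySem

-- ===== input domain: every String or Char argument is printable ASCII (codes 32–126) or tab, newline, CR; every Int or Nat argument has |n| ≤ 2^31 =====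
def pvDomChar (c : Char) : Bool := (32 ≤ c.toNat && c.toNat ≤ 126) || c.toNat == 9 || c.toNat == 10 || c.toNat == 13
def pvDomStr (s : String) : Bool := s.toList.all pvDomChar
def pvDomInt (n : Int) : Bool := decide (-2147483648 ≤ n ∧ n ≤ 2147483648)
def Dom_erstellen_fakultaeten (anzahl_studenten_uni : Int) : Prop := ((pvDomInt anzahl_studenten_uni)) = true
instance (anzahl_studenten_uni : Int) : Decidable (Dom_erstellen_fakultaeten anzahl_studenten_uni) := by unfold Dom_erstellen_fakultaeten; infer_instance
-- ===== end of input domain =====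

-- B replaces A's exponential recursive Fibonacci (recomputed from scratch every loop
-- iteration) with an iterative (a, b) pair giving each term in O(1); objective: faster.

-- ===== PORT A =====
-- A's recursive _fibonacci_fakultaeten; the loop only calls it with n = 0,1,2,…, so the
-- counter is a Nat here (Python's `n` starts at 0 and is only incremented).
def fibA (n : Nat) : Int :=
  if n < 2 then (n : Int)
  else fibA (n - 1) + fibA (n - 2)

-- lower bounds on fibA, needed for the termination of A's `while True` loop
theorem fibA_bounds : ∀ n : Nat, ((n : Int) - 1 ≤ fibA n ∧ 0 ≤ fibA n ∧ (1 ≤ n → 1 ≤ fibA n)) := by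
  intro n
  induction n using fibA.induct with
  | case1 n h =>
    rw [fibA]; simp only [if_pos h]
    interval_cases n <;> simp
  | case2 n h ih1 ih2 =>
    obtain ⟨m, rfl⟩ : ∃ m, n = m + 2 := ⟨n - 2, by omega⟩
    have e1 : m + 2 - 1 = m + 1 := rfl
    have e2 : m + 2 - 2 = m := rfl
    rw [fibA, if_neg h, e1, e2]
    rw [e1] at ih1; rw [e2] at ih2
    obtain ⟨a1, a2, a3⟩ := ih1
    obtain ⟨b1, b2, b3⟩ := ih2
    have a3' := a3 (by omega)
    rcases Nat.eq_zero_or_pos m with hm | hm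
    · subst hm; push_cast at *; omega
    · have b3' := b3 hm; push_cast at *; omega

-- A's `while True` loop: state (liste, total, n); terminates because fibA n ≥ n - 1.
def loopA (anzahl : Int) (liste : List Int) (total : Int) (n : Nat) : List Int × Int :=
  let studenten := fibA n
  if total + studenten > anzahl then (liste, total)
  else loopA anzahl (liste ++ [studenten]) (total + studenten) (n + 1)
termination_by (anzahl + 2 - (n : Int) - total).toNat
decreasing_by
  have hb := fibA_bounds n
  simp only [not_lt] at *
  omega

def erstellen_fakultaeten (anzahl_studenten_uni : Int) : List Int × Int :=
  loopA anzahl_studenten_uni [] 0 0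

-- ===== PORT B =====
-- B's while loop: (a, b) is the iterative Fibonacci pair; the positivity of b is a
-- termination-only proof argument (b starts at 1 and only grows).
def loopB (anzahl : Int) (liste : List Int) (total : Int) (a b : Nat) (hb : 0 < b) : List Int × Int :=
  if total + (a : Int) > anzahl then (liste, total)
  else loopB anzahl (liste ++ [(a : Int)]) (total + (a : Int)) b (a + b) (by omega)
termination_by (anzahl + 2 - total - (a : Int)).toNat
decreasing_by
  simp only [not_lt] at *
  omega

def erstellen_fakultaeten_alt (anzahl_studenten_uni : Int) : List Int × Int :=
  loopB anzahl_studenten_uni [] 0 0 1 (by omega)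

-- ===== PRECONDITION & SPEC =====
-- Python A raises ValueError on negative input (and so does B); Pre_ excludes exactly those.
def Pre_erstellen_fakultaeten (anzahl_studenten_uni : Int) : Prop := 0 ≤ anzahl_studenten_uni
instance (anzahl_studenten_uni : Int) : Decidable (Pre_erstellen_fakultaeten anzahl_studenten_uni) := by unfold Pre_erstellen_fakultaeten; infer_instance
def pvWitness_erstellen_fakultaeten : Int := 10

def Spec_erstellen_fakultaeten (anzahl_studenten_uni : Int) (out : List Int × Int) : Prop := out = erstellen_fakultaeten_alt anzahl_studenten_uni
instance (anzahl_studenten_uni : Int) (out : List Int × Int) : Decidable (Spec_erstellen_fakultaeten anzahl_studenten_uni out) := by unfold Spec_erstellen_fakultaeten; infer_instance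

-- ===== CLAIM (what is proved, stated in full; the proofs are below) =====
def Claim_equal_erstellen_fakultaeten : Prop := ∀ (anzahl_studenten_uni : Int), Dom_erstellen_fakultaeten anzahl_studenten_uni → Pre_erstellen_fakultaeten anzahl_studenten_uni → Spec_erstellen_fakultaeten anzahl_studenten_uni (erstellen_fakultaeten anzahl_studenten_uni)

-- ===== LEMMAS AND PROOFS =====

-- reference Fibonacci, matching B's update b' = a + b
def fibN : Nat → Nat
  | 0 => 0
  | 1 => 1
  | n + 2 => fibN n + fibN (n + 1)

theorem fibA_eq_fibN : ∀ n, fibA n = (fibN n : Int) := by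
  intro n
  induction n using fibA.induct with
  | case1 n h =>
    rw [fibA]; simp only [if_pos h]
    interval_cases n <;> rfl
  | case2 n h ih1 ih2 =>
    obtain ⟨m, rfl⟩ : ∃ m, n = m + 2 := ⟨n - 2, by omega⟩
    have e1 : m + 2 - 1 = m + 1 := rfl
    have e2 : m + 2 - 2 = m := rfl
    rw [fibA, if_neg h, e1, e2]
    rw [e1] at ih1; rw [e2] at ih2
    rw [ih1, ih2, show fibN (m + 2) = fibN m + fibN (m + 1) from rfl]
    push_cast; ring

theorem fibN_succ_pos : ∀ n, 0 < fibN (n + 1) := by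
  intro n
  induction n with
  | zero => decide
  | succ m ih => rw [fibN]; omega

theorem loop_eq (anzahl : Int) (liste : List Int) (total : Int) (n : Nat) :
    loopA anzahl liste total n
      = loopB anzahl liste total (fibN n) (fibN (n + 1)) (fibN_succ_pos n) := by
  induction liste, total, n using loopA.induct anzahl with
  | case1 liste total n st hcond =>
    rw [loopA, loopB]
    simp only [st, fibA_eq_fibN] at hcond
    simp [fibA_eq_fibN, hcond]
  | case2 liste total n st hcond ih =>
    rw [loopA, loopB]
    simp only [st, fibA_eq_fibN] at hcond ih
    simp only [fibA_eq_fibN, if_neg hcond]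
    rw [ih]
    rfl

-- ===== VERDICT (by name: the statement is the Claim_ definition above) =====
theorem erstellen_fakultaeten_spec : Claim_equal_erstellen_fakultaeten := by
  intro anzahl _ _
  unfold Spec_erstellen_fakultaeten erstellen_fakultaeten erstellen_fakultaeten_alt
  exact loop_eq anzahl [] 0 0
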